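-- pv_equiv track=rewrite | github.com/aa2276016/MyPygame | tetris.py | flag_clear_lines
-- ===== SOURCE A (Python) =====
-- def flag_clear_lines(ppc):
--     cts = {}
--     for k in ppc:
--         if k[1] not in cts.keys():
--             cts[k[1]] = 1
--         else:
--             cts[k[1]] += 1
--         if cts[k[1]] >= 10:
--             return True
--     return False
-- ===== SOURCE B (Python) =====
-- def flag_clear_lines(ppc):
--     # Sort the second coordinates; 10 equal values exist iff, in the sorted
--     # order, some element equals the element 9 positions later.
--     ys = sorted(k[1] for k in ppc)
--     return any(ys[i] == ys[i + 9] for i in range(len(ys) - 9))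
-- ===== Notes on version B (the rewrite author's own statement) =====
-- stated objective: alternative
-- what changed: A counts second coordinates in a dict and early-exits when a count reaches 10; B sorts the second coordinates and scans the sorted list for an element equal to the one 9 positions later (10 equal values are adjacent after sorting).
import Mathlib
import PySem

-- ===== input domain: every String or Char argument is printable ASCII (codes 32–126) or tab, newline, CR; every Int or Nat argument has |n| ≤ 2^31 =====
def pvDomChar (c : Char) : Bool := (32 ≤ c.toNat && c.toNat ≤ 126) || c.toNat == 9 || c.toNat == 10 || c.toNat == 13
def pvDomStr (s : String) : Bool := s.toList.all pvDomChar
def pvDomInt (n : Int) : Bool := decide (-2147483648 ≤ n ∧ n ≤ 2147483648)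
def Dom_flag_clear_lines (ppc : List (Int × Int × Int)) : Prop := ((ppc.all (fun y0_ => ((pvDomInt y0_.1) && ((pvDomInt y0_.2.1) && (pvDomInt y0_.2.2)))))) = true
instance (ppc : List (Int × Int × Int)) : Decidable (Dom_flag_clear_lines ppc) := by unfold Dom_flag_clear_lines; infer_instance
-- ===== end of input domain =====

-- B replaces A's dict counting with early exit by a different algorithm: sort the second
-- coordinates, then scan the sorted list for an element equal to the one 9 positions later.

-- ===== PORT A =====
-- loop of A: dict cts carried along, early return True when a count reaches 10
def flagGo (cts : PySem.Dict Int Int) : List (Int × Int × Int) → Bool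
  | [] => false
  | k :: rest =>
    let cts' := if cts.contains k.2.1 = false
                then cts.insert k.2.1 1                 -- cts[k[1]] = 1
                else cts.modify k.2.1 0 (· + 1)         -- cts[k[1]] += 1
    if 10 ≤ cts'.getD k.2.1 0 then true else flagGo cts' rest

def flag_clear_lines (ppc : List (Int × Int × Int)) : Bool :=
  flagGo PySem.Dict.empty ppc

-- ===== PORT B =====
def flag_clear_lines_alt (ppc : List (Int × Int × Int)) : Bool :=
  -- ys = sorted(k[1] for k in ppc)
  let ys := PySem.List.sorted (ppc.map (fun k => k.2.1)) (fun y => y) false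
  -- any(ys[i] == ys[i + 9] for i in range(len(ys) - 9))
  (PySem.List.pyRange 0 ((ys.length : Int) - 9) 1).any
    (fun i => PySem.List.pyGet? ys i == PySem.List.pyGet? ys (i + 9))

-- ===== PRECONDITION & SPEC =====
def Spec_flag_clear_lines (ppc : List (Int × Int × Int)) (out : Bool) : Prop := out = flag_clear_lines_alt ppc
instance (ppc : List (Int × Int × Int)) (out : Bool) : Decidable (Spec_flag_clear_lines ppc out) := by unfold Spec_flag_clear_lines; infer_instance

-- ===== CLAIM (what is proved, stated in full; the proofs are below) =====
def Claim_equal_flag_clear_lines : Prop := ∀ (ppc : List (Int × Int × Int)), Dom_flag_clear_lines ppc → Spec_flag_clear_lines ppc (flag_clear_lines ppc)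

-- ===== LEMMAS AND PROOFS =====

-- the updated dict in A's loop body: lookup after the two branches
lemma flagGo_step_getD (cts : PySem.Dict Int Int) (y z : Int) :
    ((if cts.contains y = false then cts.insert y 1 else cts.modify y 0 (· + 1)).getD z 0)
      = if z = y then cts.getD y 0 + 1 else cts.getD z 0 := by
  by_cases h : cts.contains y = false
  · have h0 : cts.getD y 0 = 0 := PySem.Dict.getD_of_not_contains cts 0 h
    rw [if_pos h, PySem.Dict.getD_insert, h0]
    simp
  · rw [if_neg h, PySem.Dict.getD_modify]

-- invariant characterisation of A's loop: with all counts-so-far below 10, it returns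
-- true iff some key's count-so-far plus its remaining occurrences reaches 10
lemma flagGo_true_iff (l : List (Int × Int × Int)) :
    ∀ (cts : PySem.Dict Int Int), (∀ y, cts.getD y 0 < 10) →
      (flagGo cts l = true ↔
        ∃ y : Int, (10 : Int) ≤ cts.getD y 0 + ((l.map (fun k => k.2.1)).count y : Int)) := by
  induction l with
  | nil =>
    intro cts h
    simp [flagGo]
    intro y
    have := h y
    omega
  | cons k rest ih =>
    intro cts h
    rw [flagGo]
    set cts' := if cts.contains k.2.1 = false then cts.insert k.2.1 1
                else cts.modify k.2.1 0 (· + 1) with hcts'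
    have hget : ∀ z, cts'.getD z 0 = if z = k.2.1 then cts.getD k.2.1 0 + 1 else cts.getD z 0 := by
      intro z; rw [hcts']; exact flagGo_step_getD cts k.2.1 z
    by_cases h10 : (10 : Int) ≤ cts'.getD k.2.1 0
    · rw [if_pos h10]
      constructor
      · intro _
        refine ⟨k.2.1, ?_⟩
        have h1 : (((k :: rest).map (fun k => k.2.1)).count k.2.1 : Int)
            = ((rest.map (fun k => k.2.1)).count k.2.1 : Int) + 1 := by
          simp
        have h2 := hget k.2.1
        simp at h2
        omega
      · intro _; rfl
    · rw [if_neg h10]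
      have hinv : ∀ y, cts'.getD y 0 < 10 := by
        intro y
        rw [hget y]
        by_cases hy : y = k.2.1
        · rw [if_pos hy]
          have h2 := hget k.2.1
          simp at h2
          omega
        · rw [if_neg hy]; exact h y
      rw [ih cts' hinv]
      have hval : ∀ z : Int, cts'.getD z 0 + ((rest.map (fun k => k.2.1)).count z : Int)
          = cts.getD z 0 + (((k :: rest).map (fun k => k.2.1)).count z : Int) := by
        intro z
        rw [hget z]
        by_cases hz : z = k.2.1
        · have hc : (((k :: rest).map (fun k => k.2.1)).count z : Int)
              = ((rest.map (fun k => k.2.1)).count z : Int) + 1 := by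
            subst hz; simp
          rw [hc, if_pos hz, hz]
          omega
        · have hc : (((k :: rest).map (fun k => k.2.1)).count z : Int)
              = ((rest.map (fun k => k.2.1)).count z : Int) := by
            simp [Ne.symm hz]
          rw [hc, if_neg hz]
      simp only [hval]

-- in ANY list, n+1 occurrences of y give two occurrences at indices ≥ n apart
lemma count_spread (y : Int) (l : List Int) :
    ∀ n : Nat, n + 1 ≤ l.count y →
      ∃ i j : Nat, i + n ≤ j ∧ j < l.length ∧ l[i]? = some y ∧ l[j]? = some y := by
  induction l with
  | nil => intro n h; simp at h
  | cons a t ih =>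
    intro n h
    by_cases ha : a = y
    · subst ha
      cases n with
      | zero =>
        exact ⟨0, 0, by omega, by simp, by simp, by simp⟩
      | succ m =>
        have ht : m + 1 ≤ t.count a := by
          rw [List.count_cons_self] at h; omega
        obtain ⟨i, j, hij, hjl, hi, hj⟩ := ih m ht
        exact ⟨0, j + 1, by omega, by simp; omega, by simp,
          by simpa using hj⟩
    · have ht : n + 1 ≤ t.count y := by
        rw [List.count_cons_of_ne ha] at h; exact h
      obtain ⟨i, j, hij, hjl, hi, hj⟩ := ih n ht
      exact ⟨i + 1, j + 1, by omega, by simp; omega, by simpa using hi, by simpa using hj⟩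

-- the sorted-list scan finds an element equal to the one 9 later iff some value occurs ≥ 10 times
lemma sorted_gap_iff (xs : List Int) :
    (∃ n : Nat, n + 9 < (PySem.List.sorted xs (fun y => y) false).length ∧
        (PySem.List.sorted xs (fun y => y) false)[n]? = (PySem.List.sorted xs (fun y => y) false)[n+9]?) ↔
      ∃ y : Int, 10 ≤ xs.count y := by
  set ys := PySem.List.sorted xs (fun y => y) false with hys
  have hperm : ys.Perm xs := PySem.List.sorted_perm xs (fun y => y) false
  have hmono : ∀ p q : Nat, (hpq : p ≤ q) → (hq : q < ys.length) →
      ys[p]'(lt_of_le_of_lt hpq hq) ≤ ys[q] := by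
    intro p q hpq hq
    exact PySem.List.sorted_id_getElem_mono xs hpq hq
  constructor
  · rintro ⟨n, hn, heq⟩
    have h3 : ys[n]'(by omega) = ys[n + 9]'(by omega) := by
      rw [List.getElem?_eq_getElem (by omega), List.getElem?_eq_getElem (by omega)] at heq
      exact Option.some.inj heq
    have hseg : (ys.drop n).take 10 = List.replicate 10 (ys[n]'(by omega)) := by
      rw [List.eq_replicate_iff]
      refine ⟨by simp; omega, ?_⟩
      intro b hb
      obtain ⟨m, hm, hbm⟩ := List.getElem_of_mem hb
      have hm10 : m < 10 := by
        have hlen : ((ys.drop n).take 10).length = 10 := by simp; omega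
        omega
      have hbm' : b = ys[n + m]'(by omega) := by
        rw [← hbm]
        simp [List.getElem_take, List.getElem_drop]
      have h1 : ys[n]'(by omega) ≤ ys[n + m]'(by omega) := hmono n (n+m) (by omega) (by omega)
      have h2 : ys[n + m]'(by omega) ≤ ys[n + 9]'(by omega) := hmono (n+m) (n+9) (by omega) (by omega)
      rw [hbm']
      omega
    refine ⟨ys[n]'(by omega), ?_⟩
    rw [← hperm.count_eq]
    have hsub : List.Sublist ((ys.drop n).take 10) ys :=
      (List.take_sublist _ _).trans (List.drop_sublist _ _)
    have hle := hsub.count_le (ys[n]'(by omega))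
    rw [hseg, List.count_replicate_self] at hle
    omega
  · rintro ⟨y, hy⟩
    have hy' : 9 + 1 ≤ ys.count y := by rw [hperm.count_eq]; omega
    obtain ⟨i, j, hij, hjl, hi, hj⟩ := count_spread y ys 9 hy'
    refine ⟨i, by omega, ?_⟩
    have hiv : ys[i]'(by omega) = y := by
      rw [List.getElem?_eq_getElem (by omega)] at hi
      exact Option.some.inj hi
    have hjv : ys[j]'(by omega) = y := by
      rw [List.getElem?_eq_getElem (by omega)] at hj
      exact Option.some.inj hj
    have h1 : ys[i]'(by omega) ≤ ys[i + 9]'(by omega) := hmono i (i+9) (by omega) (by omega)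
    have h2 : ys[i + 9]'(by omega) ≤ ys[j]'(by omega) := hmono (i+9) j (by omega) (by omega)
    rw [List.getElem?_eq_getElem (by omega), List.getElem?_eq_getElem (by omega), hiv]
    have hv : ys[i + 9]'(by omega) = y := by omega
    rw [hv]

-- B's scan, characterised: true iff some second coordinate occurs at least 10 times
lemma alt_true_iff (ppc : List (Int × Int × Int)) :
    (flag_clear_lines_alt ppc = true ↔
      ∃ y : Int, 10 ≤ (ppc.map (fun k => k.2.1)).count y) := by
  unfold flag_clear_lines_alt
  rw [← sorted_gap_iff]
  set ys := PySem.List.sorted (ppc.map (fun k => k.2.1)) (fun y => y) false with hys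
  rw [List.any_eq_true]
  constructor
  · rintro ⟨i, hmem, hbeq⟩
    rw [PySem.List.mem_pyRange_one] at hmem
    obtain ⟨h0, hlt⟩ := hmem
    refine ⟨i.toNat, by omega, ?_⟩
    rw [beq_iff_eq] at hbeq
    rw [PySem.List.pyGet?_of_nonneg ys h0,
        PySem.List.pyGet?_of_nonneg ys (show (0:Int) ≤ i + 9 by omega)] at hbeq
    have h9 : (i + 9).toNat = i.toNat + 9 := by omega
    rw [h9] at hbeq
    exact hbeq
  · rintro ⟨n, hn, heq⟩
    refine ⟨(n : Int), ?_, ?_⟩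
    · rw [PySem.List.mem_pyRange_one]
      omega
    · rw [beq_iff_eq,
        PySem.List.pyGet?_of_nonneg ys (show (0:Int) ≤ (n:Int) by omega),
        PySem.List.pyGet?_of_nonneg ys (show (0:Int) ≤ (n:Int) + 9 by omega)]
      have h9 : ((n : Int) + 9).toNat = n + 9 := by omega
      have hn' : (n : Int).toNat = n := by omega
      rw [h9, hn']
      exact heq

-- ===== VERDICT (by name: the statement is the Claim_ definition above) =====
theorem flag_clear_lines_spec : Claim_equal_flag_clear_lines := by
  intro ppc _
  unfold Spec_flag_clear_lines flag_clear_lines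
  rw [Bool.eq_iff_iff]
  rw [flagGo_true_iff ppc PySem.Dict.empty (by intro y; simp [PySem.Dict.getD_empty])]
  rw [alt_true_iff]
  refine exists_congr fun y => ?_
  simp [PySem.Dict.getD_empty]
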